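-- pv_equiv track=rewrite | github.com/RubenAngelov/TDDE44 | labb_4/del_1/skapa_kaffediagram_2.py | prepare_data2
-- ===== SOURCE A (Python) =====
-- def prepare_data2(data):
--     x_values = []
--     y_values = []
--     for day in range(1, len(data[0])):
--         total_cups = 0
--         for hour in range(1, len(data)):
--             total_cups += data[hour][day]
--
--         x_values.append(data[0][day])
--         y_values.append(total_cups)
--
--     return [x_values, y_values]
-- ===== SOURCE B (Python) =====
-- def prepare_data2(data):
--     header = data[0]
--     x_values = header[1:]
--     y_values = [0] * (len(header) - 1)
--     for row in data[1:]:
--         y_values = [y + v for y, v in zip(y_values, row[1:])]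
--     return [x_values, y_values]
-- ===== Notes on version B (the rewrite author's own statement) =====
-- stated objective: alternative
-- what changed: A sums each day column with a nested per-column scan over all rows; B makes a single pass over the data rows, maintaining a parallel accumulator list (zip-add of each row's tail) and slices the header for the x values.
import Mathlib
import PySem

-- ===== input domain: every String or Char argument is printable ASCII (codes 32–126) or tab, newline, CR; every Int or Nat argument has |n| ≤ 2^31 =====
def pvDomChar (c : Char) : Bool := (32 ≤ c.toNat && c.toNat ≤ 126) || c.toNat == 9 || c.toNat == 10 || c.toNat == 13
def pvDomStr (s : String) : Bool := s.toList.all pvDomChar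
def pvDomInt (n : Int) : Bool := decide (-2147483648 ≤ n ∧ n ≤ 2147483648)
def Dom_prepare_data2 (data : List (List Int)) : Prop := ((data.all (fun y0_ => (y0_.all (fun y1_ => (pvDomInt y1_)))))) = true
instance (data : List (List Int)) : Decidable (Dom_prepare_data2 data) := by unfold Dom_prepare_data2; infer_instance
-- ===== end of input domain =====

-- A sums each day column with a nested per-column scan; B makes one pass over the rows
-- with a parallel accumulator list (alternative decomposition, same cost).

-- ===== PORT A =====
def prepare_data2 (data : List (List Int)) : List (List Int) :=
  let h := data.headD []
  let p := (PySem.List.pyRange 1 (h.length : Int) 1).foldl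
    (fun (st : List Int × List Int) day =>
      let total := (PySem.List.pyRange 1 (data.length : Int) 1).foldl
        (fun t hour => t + PySem.List.pyGetD (PySem.List.pyGetD data hour []) day 0) 0
      (st.1 ++ [PySem.List.pyGetD h day 0], st.2 ++ [total]))
    ([], [])
  [p.1, p.2]

-- ===== PORT B =====
def prepare_data2_alt (data : List (List Int)) : List (List Int) :=
  let header := data.headD []
  let x_values := header.drop 1
  let y_values := data.tail.foldl
    (fun acc row => (acc.zip (row.drop 1)).map (fun p => p.1 + p.2))
    (List.replicate (header.length - 1) (0 : Int))
  [x_values, y_values]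

-- ===== PRECONDITION & SPEC =====
-- Pre_ excludes exactly the inputs where A raises: empty data (IndexError on data[0]),
-- and a data row shorter than a header of length ≥ 2 (IndexError on data[hour][day]).
def Pre_prepare_data2 (data : List (List Int)) : Prop :=
  data ≠ [] ∧ (2 ≤ (data.headD []).length →
    ∀ row ∈ data.tail, (data.headD []).length ≤ row.length)
instance (data : List (List Int)) : Decidable (Pre_prepare_data2 data) := by
  unfold Pre_prepare_data2; infer_instance
def pvWitness_prepare_data2 : List (List Int) := [[0, 1, 2], [9, 1, 2], [8, 3, 4]]
def Spec_prepare_data2 (data : List (List Int)) (out : List (List Int)) : Prop := out = prepare_data2_alt data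
instance (data : List (List Int)) (out : List (List Int)) : Decidable (Spec_prepare_data2 data out) := by unfold Spec_prepare_data2; infer_instance

-- ===== CLAIM (what is proved, stated in full; the proofs are below) =====
def Claim_equal_prepare_data2 : Prop := ∀ (data : List (List Int)), Dom_prepare_data2 data → Pre_prepare_data2 data → Spec_prepare_data2 data (prepare_data2 data)

-- ===== LEMMAS AND PROOFS =====

-- generic: a list equals the range-indexed map of its getD
theorem map_range_getD {α : Type} (d : α) (l : List α) :
    (List.range l.length).map (fun k => l.getD k d) = l := by
  apply List.ext_getElem
  · simp
  · intro i h1 h2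
    simp [List.getD_eq_getElem?_getD, List.getElem?_eq_getElem h2]

theorem getD_drop_one {α : Type} (l : List α) (k : Nat) (d : α) :
    (l.drop 1).getD k d = l.getD (1 + k) d := by
  simp [List.getD_eq_getElem?_getD, Nat.add_comm]

-- A's outer loop: folding with appends to both components = two maps
theorem foldl_app_pair (l : List Int) (f g : Int → Int) (xs ys : List Int) :
    l.foldl (fun (st : List Int × List Int) d => (st.1 ++ [f d], st.2 ++ [g d])) (xs, ys)
      = (xs ++ l.map f, ys ++ l.map g) := by
  induction l generalizing xs ys with
  | nil => simp
  | cons a t ih => simp [List.foldl_cons, ih]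

-- A's inner loop: the per-column sum over hours = sum over the tail rows
theorem pv_inner_sum (h : List Int) (t : List (List Int)) (day : Int) :
    (PySem.List.pyRange 1 ((h :: t).length : Int) 1).foldl
        (fun s hour => s + PySem.List.pyGetD (PySem.List.pyGetD (h :: t) hour []) day 0) 0
      = ((List.range t.length).map (fun k => PySem.List.pyGetD (t.getD k []) day 0)).sum := by
  rw [PySem.List.pyRange_one]
  have hlen : (((h :: t).length : Int) - 1).toNat = t.length := by simp
  rw [hlen, List.foldl_map]
  rw [PySem.List.foldl_congr_mem _ _
    (fun s k => s + PySem.List.pyGetD (t.getD k []) day 0) _ ?_]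
  · rw [List.sum_eq_foldl, List.foldl_map]
  · intro s k _
    have h1 : (0:Int) ≤ 1 + (k:Int) := by positivity
    rw [PySem.List.pyGetD_of_nonneg _ _ h1]
    have ht2 : ((1:Int) + (k:Int)).toNat = k + 1 := by omega
    simp [ht2]

-- B's loop invariant: one zip-add pass per row adds its column entries pointwise
theorem fold_zip_add (t : List (List Int)) (acc : List Int)
    (hl : ∀ row ∈ t, acc.length ≤ (row.drop 1).length) :
    t.foldl (fun acc row => (acc.zip (row.drop 1)).map (fun p => p.1 + p.2)) acc
      = (List.range acc.length).map
          (fun k => acc.getD k 0 + ((t.map (fun r => (r.drop 1).getD k 0)).sum)) := by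
  induction t generalizing acc with
  | nil => simpa using (map_range_getD 0 acc).symm
  | cons r tl ih =>
    have hr : acc.length ≤ (r.drop 1).length := hl r (by simp)
    have htl : ∀ row ∈ tl, acc.length ≤ (row.drop 1).length := fun row hm => hl row (by simp [hm])
    set acc' := (acc.zip (r.drop 1)).map (fun p => p.1 + p.2) with hacc'
    have hlen' : acc'.length = acc.length := by
      simp only [hacc', List.length_map, List.length_zip]
      omega
    have htl' : ∀ row ∈ tl, acc'.length ≤ (row.drop 1).length := by
      intro row hm; rw [hlen']; exact htl row hm
    rw [List.foldl_cons, ih acc' htl', hlen']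
    apply List.map_congr_left
    intro k hk
    have hk' : k < acc.length := List.mem_range.mp hk
    have hk2 : k < (r.drop 1).length := lt_of_lt_of_le hk' hr
    have hstep : acc'.getD k 0 = acc.getD k 0 + (r.drop 1).getD k 0 := by
      have hz : k < (acc.zip (r.drop 1)).length := by
        simp only [List.length_zip]; omega
      have hk3 : k + 1 < r.length := by
        simp only [List.length_drop] at hk2; omega
      rw [hacc', List.getD_eq_getElem?_getD, List.getElem?_map,
        List.getElem?_eq_getElem hz, List.getElem_zip]
      simp [List.getD_eq_getElem?_getD, List.getElem?_eq_getElem hk',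
        List.getElem?_eq_getElem hk3]
    rw [hstep, List.map_cons, List.sum_cons]
    ring

-- the two per-column sums agree when every tail row is long enough
theorem sums_agree (t : List (List Int)) (n : Nat)
    (_hl : 2 ≤ n → ∀ row ∈ t, n ≤ row.length) (k : Nat) (_hk : k < n - 1) :
    ((List.range t.length).map (fun j => PySem.List.pyGetD (t.getD j []) (1 + (k:Int)) 0)).sum
      = (t.map (fun r => (r.drop 1).getD k 0)).sum := by
  have hstep : ∀ j ∈ List.range t.length,
      PySem.List.pyGetD (t.getD j []) (1 + (k:Int)) 0 = ((t.getD j []).drop 1).getD k 0 := by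
    intro j hj
    have h1 : (0:Int) ≤ 1 + (k:Int) := by positivity
    rw [PySem.List.pyGetD_of_nonneg _ _ h1]
    have ht2 : ((1:Int) + (k:Int)).toNat = 1 + k := by omega
    rw [ht2, getD_drop_one]
  rw [List.map_congr_left hstep]
  have h2 : (List.range t.length).map (fun j => ((t.getD j []).drop 1).getD k 0)
      = t.map (fun r => (r.drop 1).getD k 0) := by
    conv_rhs => rw [← map_range_getD ([] : List Int) t]
    rw [List.map_map]
    rfl
  rw [h2]

-- ===== VERDICT (by name: the statement is the Claim_ definition above) =====
theorem prepare_data2_spec : Claim_equal_prepare_data2 := by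
  intro data _ hpre
  obtain ⟨hne, hrows⟩ := hpre
  cases data with
  | nil => exact absurd rfl hne
  | cons h t =>
    simp only [List.headD_cons, List.tail_cons] at hrows ⊢
    unfold Spec_prepare_data2 prepare_data2 prepare_data2_alt
    simp only [List.headD_cons, List.tail_cons]
    rw [foldl_app_pair, List.nil_append, List.nil_append]
    rw [PySem.List.pyRange_one]
    have hn1 : (((h.length : Int)) - 1).toNat = h.length - 1 := by omega
    rw [hn1, List.map_map, List.map_map]
    have hlB : ∀ row ∈ t, (List.replicate (h.length - 1) (0:Int)).length ≤ (row.drop 1).length := by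
      intro row hm
      simp only [List.length_replicate, List.length_drop]
      by_cases h2 : 2 ≤ h.length
      · have := hrows h2 row hm; omega
      · omega
    rw [fold_zip_add t _ hlB]
    simp only [List.length_replicate]
    congr 1
    · -- x values
      have hx : ∀ k ∈ List.range (h.length - 1),
          ((fun d => PySem.List.pyGetD h d 0) ∘ fun (k : Nat) => 1 + (k:Int)) k
            = (h.drop 1).getD k 0 := by
        intro k _
        have h1 : (0:Int) ≤ 1 + (k:Int) := by positivity
        simp only [Function.comp]
        rw [PySem.List.pyGetD_of_nonneg _ _ h1]
        have ht2 : ((1:Int) + (k:Int)).toNat = 1 + k := by omega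
        rw [ht2, getD_drop_one]
      rw [List.map_congr_left hx]
      have := map_range_getD (0:Int) (h.drop 1)
      simpa using this
    · -- y values
      congr 1
      apply List.map_congr_left
      intro k hk
      have hk' : k < h.length - 1 := List.mem_range.mp hk
      simp only [Function.comp]
      rw [pv_inner_sum, sums_agree t h.length hrows k hk']
      simp
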